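-- pv_equiv track=rewrite | github.com/briankaplan/tallyups | smart_notes_engine.py | is_business_relevant_event
-- ===== SOURCE A (Python) =====
-- PERSONAL_EVENT_KEYWORDS = [
--     'birthday', 'bday', 'b-day', "b'day",
--     'anniversary',
--     'dentist', 'doctor', 'appointment', 'checkup', 'physical',
--     'school', 'pickup', 'drop off', 'dropoff', 'carpool',
--     'recital', 'game', 'practice', 'soccer', 'basketball', 'football', 'baseball',
--     'vacation', 'holiday', 'pto', 'day off',
--     'haircut', 'salon', 'spa',
-- ]
--
-- def is_business_relevant_event(event: dict) -> bool:
--     """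
--     Check if a calendar event is business-relevant for expense categorization.
--     Filters out birthdays, personal appointments, kids' events, etc.
--     """
--     title = (event.get('title') or '').lower()
--     description = (event.get('description') or '').lower()
--
--     # Check title and description for personal keywords
--     combined_text = f"{title} {description}"
--
--     for keyword in PERSONAL_EVENT_KEYWORDS:
--         if keyword in combined_text:
--             return False
--
--     return True
-- ===== SOURCE B (Python) =====
-- PERSONAL_EVENT_KEYWORDS = [
--     'birthday', 'bday', 'b-day', "b'day",
--     'anniversary',
--     'dentist', 'doctor', 'appointment', 'checkup', 'physical',
--     'school', 'pickup', 'drop off', 'dropoff', 'carpool',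
--     'recital', 'game', 'practice', 'soccer', 'basketball', 'football', 'baseball',
--     'vacation', 'holiday', 'pto', 'day off',
--     'haircut', 'salon', 'spa',
-- ]
--
-- def is_business_relevant_event(event: dict) -> bool:
--     text = (event.get('title') or '').lower() + ' ' + (event.get('description') or '').lower()
--     # single left-to-right walk over the suffixes of the text: at each position,
--     # test whether some personal keyword starts exactly here.
--     pos = 0
--     while pos < len(text):
--         for kw in PERSONAL_EVENT_KEYWORDS:
--             if text.startswith(kw, pos):
--                 return False
--         pos += 1
--     return True
-- ===== Notes on version B (the rewrite author's own statement) =====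
-- stated objective: alternative
-- what changed: B replaces A's outer loop over keywords (one full substring scan of the text per keyword, early return on first hit) with a single left-to-right walk over the positions of the combined text, testing at each position whether any keyword starts there as a prefix.
import Mathlib
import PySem

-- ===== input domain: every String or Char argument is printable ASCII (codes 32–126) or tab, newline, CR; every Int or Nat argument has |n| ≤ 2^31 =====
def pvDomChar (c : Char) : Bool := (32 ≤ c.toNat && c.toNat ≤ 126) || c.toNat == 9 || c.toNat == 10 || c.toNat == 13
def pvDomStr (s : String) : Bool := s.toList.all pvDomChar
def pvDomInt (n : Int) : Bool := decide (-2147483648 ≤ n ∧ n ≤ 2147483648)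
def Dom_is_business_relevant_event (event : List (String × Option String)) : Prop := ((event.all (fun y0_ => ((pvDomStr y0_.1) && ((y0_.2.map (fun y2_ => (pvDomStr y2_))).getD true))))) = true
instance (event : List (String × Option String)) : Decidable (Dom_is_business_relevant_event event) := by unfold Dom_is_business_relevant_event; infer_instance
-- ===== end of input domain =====

-- B is an alternative implementation: one left-to-right walk over the suffixes of the combined
-- text testing every keyword as a prefix at each position, instead of A's per-keyword substring scans.

-- ===== PORT A =====
def pvKeywords : List String := [
  "birthday", "bday", "b-day", "b'day",
  "anniversary",
  "dentist", "doctor", "appointment", "checkup", "physical",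
  "school", "pickup", "drop off", "dropoff", "carpool",
  "recital", "game", "practice", "soccer", "basketball", "football", "baseball",
  "vacation", "holiday", "pto", "day off",
  "haircut", "salon", "spa"]

-- combined_text = f"{(event.get('title') or '').lower()} {(event.get('description') or '').lower()}"
def pvTextA (event : List (String × Option String)) : List Char :=
  let d := PySem.Dict.mk event
  let title := PySem.Chars.lower (((d.get? "title").getD none).getD "").toList
  let description := PySem.Chars.lower (((d.get? "description").getD none).getD "").toList
  title ++ ' ' :: description

-- for keyword in PERSONAL_EVENT_KEYWORDS: if keyword in combined_text: return False / return True
def pvLoopA : List String → List Char → Bool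
  | [], _ => true
  | k :: ks, t => if PySem.Chars.isIn k.toList t then false else pvLoopA ks t

def is_business_relevant_event (event : List (String × Option String)) : Bool :=
  pvLoopA pvKeywords (pvTextA event)

-- ===== PORT B =====
def pvKeywordsB : List (List Char) := [
  "birthday".toList, "bday".toList, "b-day".toList, "b'day".toList,
  "anniversary".toList,
  "dentist".toList, "doctor".toList, "appointment".toList, "checkup".toList, "physical".toList,
  "school".toList, "pickup".toList, "drop off".toList, "dropoff".toList, "carpool".toList,
  "recital".toList, "game".toList, "practice".toList, "soccer".toList, "basketball".toList,
  "football".toList, "baseball".toList,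
  "vacation".toList, "holiday".toList, "pto".toList, "day off".toList,
  "haircut".toList, "salon".toList, "spa".toList]

-- while pos < len(text): for kw in ...: if text.startswith(kw, pos): return False; pos += 1 / return True
-- modelled as structural recursion over the suffix of the text starting at pos
def pvScanB : List Char → Bool
  | [] => true
  | c :: rest =>
    if pvKeywordsB.any (fun kw => PySem.Chars.startswith (c :: rest) kw) then false
    else pvScanB rest

-- text = (event.get('title') or '').lower() + ' ' + (event.get('description') or '').lower()
def is_business_relevant_event_alt (event : List (String × Option String)) : Bool :=
  let d := PySem.Dict.mk event
  pvScanB (PySem.Chars.lower (((d.get? "title").getD none).getD "").toList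
            ++ ' ' :: PySem.Chars.lower (((d.get? "description").getD none).getD "").toList)

-- ===== PRECONDITION & SPEC =====
def Spec_is_business_relevant_event (event : List (String × Option String)) (out : Bool) : Prop := out = is_business_relevant_event_alt event
instance (event : List (String × Option String)) (out : Bool) : Decidable (Spec_is_business_relevant_event event out) := by unfold Spec_is_business_relevant_event; infer_instance

-- ===== CLAIM =====
def Claim_equal_is_business_relevant_event : Prop := ∀ (event : List (String × Option String)), Dom_is_business_relevant_event event → Spec_is_business_relevant_event event (is_business_relevant_event event)

-- ===== LEMMAS AND PROOFS =====

lemma pvKeywordsB_eq : pvKeywordsB = pvKeywords.map String.toList := by decide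

lemma pvLoopA_eq (ks : List String) (t : List Char) :
    pvLoopA ks t = !ks.any (fun k => PySem.Chars.isIn k.toList t) := by
  induction ks with
  | nil => simp [pvLoopA]
  | cons k ks ih =>
    by_cases h : PySem.Chars.isIn k.toList t = true <;> simp [pvLoopA, h, ih]

lemma pvScanB_eq_false_iff (t : List Char) :
    pvScanB t = false ↔ ∃ j, ∃ kw ∈ pvKeywordsB, kw <+: t.drop j := by
  induction t with
  | nil =>
    simp only [pvScanB, List.drop_nil, List.prefix_nil]
    constructor
    · intro h; cases h
    · rintro ⟨j, kw, hkw, rfl⟩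
      exact absurd hkw (by decide)
  | cons c rest ih =>
    simp only [pvScanB]
    split_ifs with h
    · simp only [List.any_eq_true, PySem.Chars.startswith_iff] at h
      obtain ⟨kw, hkw, hp⟩ := h
      exact ⟨fun _ => ⟨0, kw, hkw, hp⟩, fun _ => rfl⟩
    · rw [ih]
      simp only [List.any_eq_true, PySem.Chars.startswith_iff, not_exists, not_and] at h
      constructor
      · rintro ⟨j, kw, hkw, hp⟩; exact ⟨j + 1, kw, hkw, hp⟩
      · rintro ⟨j, kw, hkw, hp⟩
        cases j with
        | zero => exact absurd hp (h kw hkw)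
        | succ j => exact ⟨j, kw, hkw, hp⟩

lemma pvScanB_eq (t : List Char) :
    pvScanB t = !pvKeywords.any (fun k => PySem.Chars.isIn k.toList t) := by
  have key : pvScanB t = false ↔ (pvKeywords.any (fun k => PySem.Chars.isIn k.toList t)) = true := by
    rw [pvScanB_eq_false_iff, List.any_eq_true]
    constructor
    · rintro ⟨j, kw, hkw, hp⟩
      rw [pvKeywordsB_eq, List.mem_map] at hkw
      obtain ⟨k, hk, rfl⟩ := hkw
      exact ⟨k, hk, (PySem.Chars.exists_prefix_drop_iff_isIn _ _).mp ⟨j, hp⟩⟩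
    · rintro ⟨k, hk, hin⟩
      obtain ⟨j, hp⟩ := (PySem.Chars.exists_prefix_drop_iff_isIn _ _).mpr hin
      exact ⟨j, k.toList, by rw [pvKeywordsB_eq]; exact List.mem_map_of_mem hk, hp⟩
  cases hb : pvScanB t <;>
    cases ha : pvKeywords.any (fun k => PySem.Chars.isIn k.toList t) <;> simp_all

-- ===== VERDICT =====
theorem is_business_relevant_event_spec : Claim_equal_is_business_relevant_event := by
  intro event _
  unfold Spec_is_business_relevant_event is_business_relevant_event is_business_relevant_event_alt pvTextA
  rw [pvLoopA_eq, pvScanB_eq]
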